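-- pv_equiv track=rewrite | github.com/AritonAjdini/tony | programs/Stat_prog_helper.py | class_ranges
-- ===== SOURCE A (Python) =====
-- def class_ranges(Min, L, K):
--     ranges = []
--     start = Min
--     for i in range(K):
--         end = start + L
--         ranges.append((start, end))
--         start = end
--     return ranges
-- ===== SOURCE B (Python) =====
-- def class_ranges(Min, L, K):
--     # Closed form: the i-th interval is [Min + i*L, Min + (i+1)*L); exact on integer inputs.
--     return [(Min + i * L, Min + (i + 1) * L) for i in range(K)]
-- ===== Notes on version B (the rewrite author's own statement) =====
-- stated objective: simpler
-- what changed: B replaces A's running-accumulator loop (start carried and updated per iteration) by a stateless closed-form comprehension computing the i-th interval directly as (Min + i*L, Min + (i+1)*L).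
import Mathlib
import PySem

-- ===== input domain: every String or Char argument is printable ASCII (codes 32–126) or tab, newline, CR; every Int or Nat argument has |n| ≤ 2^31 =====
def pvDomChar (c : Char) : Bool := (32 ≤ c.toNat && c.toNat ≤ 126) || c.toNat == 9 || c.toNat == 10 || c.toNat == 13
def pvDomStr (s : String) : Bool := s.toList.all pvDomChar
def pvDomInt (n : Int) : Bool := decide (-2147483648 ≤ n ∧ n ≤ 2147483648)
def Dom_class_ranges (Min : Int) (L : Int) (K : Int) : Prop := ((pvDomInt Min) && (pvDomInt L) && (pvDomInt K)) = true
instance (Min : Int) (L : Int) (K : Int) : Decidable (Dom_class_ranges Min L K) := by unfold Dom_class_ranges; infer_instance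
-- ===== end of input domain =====

-- B replaces A's running-accumulator loop by a stateless closed-form comprehension (Min + i*L, Min + (i+1)*L); simpler, exact on integers.


-- ===== PORT A =====
-- for i in range(K): end = start+L; ranges.append((start,end)); start = end
def class_ranges (Min : Int) (L : Int) (K : Int) : List (Int × Int) :=
  ((PySem.List.pyRange 0 K 1).foldl
    (fun (st : List (Int × Int) × Int) _ =>
      let e := st.2 + L
      (st.1 ++ [(st.2, e)], e))
    ([], Min)).1

-- ===== PORT B =====
-- [(Min + i*L, Min + (i+1)*L) for i in range(K)]
def class_ranges_alt (Min : Int) (L : Int) (K : Int) : List (Int × Int) :=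
  (PySem.List.pyRange 0 K 1).map (fun i => (Min + i * L, Min + (i + 1) * L))

-- ===== PRECONDITION & SPEC =====
def Spec_class_ranges (Min : Int) (L : Int) (K : Int) (out : List (Int × Int)) : Prop := out = class_ranges_alt Min L K
instance (Min : Int) (L : Int) (K : Int) (out : List (Int × Int)) : Decidable (Spec_class_ranges Min L K out) := by unfold Spec_class_ranges; infer_instance

-- ===== CLAIM =====
def Claim_equal_class_ranges : Prop := ∀ (Min : Int) (L : Int) (K : Int), Dom_class_ranges Min L K → Spec_class_ranges Min L K (class_ranges Min L K)

-- ===== LEMMAS AND PROOFS =====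

theorem pvA_loop {α : Type} (L : Int) : ∀ (xs : List α) (start : Int) (acc : List (Int × Int)),
    xs.foldl
      (fun (st : List (Int × Int) × Int) _ =>
        let e := st.2 + L
        (st.1 ++ [(st.2, e)], e))
      (acc, start)
    = (acc ++ (List.range xs.length).map (fun i : Nat => (start + (i:Int) * L, start + ((i:Int) + 1) * L)),
       start + xs.length * L) := by
  intro xs
  induction xs with
  | nil => simp
  | cons x xs ih =>
    intro start acc
    simp only [List.foldl_cons, List.length_cons, List.range_succ_eq_map]
    rw [ih]
    simp only [Prod.mk.injEq]
    constructor
    · simp only [List.append_assoc, List.cons_append, List.nil_append]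
      congr 1
      congr 1
      · simp only [Prod.mk.injEq]
        constructor <;> (push_cast; try ring)
      · rw [List.map_map]; apply List.map_congr_left; intro i _; simp only [Function.comp_apply]
        simp only [Prod.mk.injEq]
        constructor <;> (push_cast; try ring)
    · push_cast; ring

-- ===== VERDICT =====
theorem class_ranges_spec : Claim_equal_class_ranges := by
  unfold Claim_equal_class_ranges Spec_class_ranges class_ranges class_ranges_alt
  intro Min L K _
  rw [pvA_loop, PySem.List.length_pyRange_one, PySem.List.pyRange_one, List.map_map]
  simp only [List.nil_append, Int.sub_zero]
  apply List.map_congr_left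
  intro i _
  simp only [Function.comp_apply, Prod.mk.injEq]
  constructor <;> (push_cast; ring)
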